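-- pv_equiv track=rewrite | github.com/jongwooc/trickcal_portfolio | oldportfolios/midap_AccSim/midap_AccSim/midap_software/pyramid.py | _calc_cycle_in_pyramid
-- ===== SOURCE A (Python) =====
-- def _calc_cycle_in_pyramid(tiles, cycles):
--     dram_delay = computation_cycle = 0
--     tile_size = tiles[0][1] - tiles[0][0]
--     for t in tiles:
--         tile_w = t[1] - t[0]
--         dram_delay += (cycles[0][0] if tile_w == tile_size else cycles[1][0])
--         computation_cycle  += (cycles[0][1] if tile_w == tile_size else cycles[1][1])
--     return dram_delay, computation_cycle
-- ===== SOURCE B (Python) =====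
-- def _calc_cycle_in_pyramid(tiles, cycles):
--     tile_size = tiles[0][1] - tiles[0][0]
--     # stage 1: aggregate all tile widths into a histogram (distinct width -> count)
--     widths = [b - a for (a, b) in tiles]
--     width_counts = {}
--     for w in widths:
--         width_counts[w] = width_counts.get(w, 0) + 1
--     # stage 2: one weighted sum over the (few) distinct widths; cycles[1] is
--     # touched only if some non-full width actually occurs, exactly as in A
--     dram_delay = computation_cycle = 0
--     for w, cnt in width_counts.items():
--         dc, cc = cycles[0] if w == tile_size else cycles[1]
--         dram_delay += cnt * dc
--         computation_cycle += cnt * cc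
--     return dram_delay, computation_cycle
-- ===== Notes on version B (the rewrite author's own statement) =====
-- stated objective: alternative
-- what changed: Replaces the per-tile accumulation loop by hash aggregation: build a histogram dict of distinct tile widths in one pass, then compute the totals as a weighted sum over the histogram's items, so the full/partial selection runs once per distinct width instead of once per tile.
import Mathlib
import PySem

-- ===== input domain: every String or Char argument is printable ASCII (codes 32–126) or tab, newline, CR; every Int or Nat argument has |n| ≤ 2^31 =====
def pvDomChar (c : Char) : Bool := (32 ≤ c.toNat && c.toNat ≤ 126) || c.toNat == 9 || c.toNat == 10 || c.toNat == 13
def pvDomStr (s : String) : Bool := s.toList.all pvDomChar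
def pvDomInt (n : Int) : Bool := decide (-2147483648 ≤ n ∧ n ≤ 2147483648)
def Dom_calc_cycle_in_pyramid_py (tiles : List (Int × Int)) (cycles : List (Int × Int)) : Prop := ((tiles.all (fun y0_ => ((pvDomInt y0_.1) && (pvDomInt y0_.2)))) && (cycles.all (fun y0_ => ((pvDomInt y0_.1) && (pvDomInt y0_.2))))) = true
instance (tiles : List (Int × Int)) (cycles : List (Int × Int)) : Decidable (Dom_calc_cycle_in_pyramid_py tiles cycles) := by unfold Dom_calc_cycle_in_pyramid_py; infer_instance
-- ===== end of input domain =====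

-- B replaces the per-tile accumulation loop by hash aggregation: a histogram dict of the
-- distinct tile widths built in one pass, then a weighted sum over its items (objective: alternative).

-- ===== PORT A =====
-- literal transliteration of A: loop over tiles, per tile adding cycles[0] or cycles[1]
def calc_cycle_in_pyramid_py (tiles : List (Int × Int)) (cycles : List (Int × Int)) : Int × Int :=
  let t0 := (PySem.List.pyGet? tiles 0).getD (0, 0)
  let tile_size := t0.2 - t0.1
  tiles.foldl (fun acc t =>
    let tile_w := t.2 - t.1
    (acc.1 + (if tile_w = tile_size then ((PySem.List.pyGet? cycles 0).getD (0, 0)).1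
              else ((PySem.List.pyGet? cycles 1).getD (0, 0)).1),
     acc.2 + (if tile_w = tile_size then ((PySem.List.pyGet? cycles 0).getD (0, 0)).2
              else ((PySem.List.pyGet? cycles 1).getD (0, 0)).2))) (0, 0)

-- ===== PORT B =====
-- transliteration of Source B: histogram dict of widths, then weighted sum over its items
def calc_cycle_in_pyramid_py_alt (tiles : List (Int × Int)) (cycles : List (Int × Int)) : Int × Int :=
  let t0 := (PySem.List.pyGet? tiles 0).getD (0, 0)
  let tile_size := t0.2 - t0.1
  let widths := tiles.map (fun t => t.2 - t.1)
  let width_counts : PySem.Dict Int Int :=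
    widths.foldl (fun d w => d.insert w (d.getD w 0 + 1)) PySem.Dict.empty
  width_counts.items.foldl (fun acc p =>
    let c := if p.1 = tile_size then (PySem.List.pyGet? cycles 0).getD (0, 0)
             else (PySem.List.pyGet? cycles 1).getD (0, 0)
    (acc.1 + p.2 * c.1, acc.2 + p.2 * c.2)) (0, 0)

-- ===== PRECONDITION & SPEC =====
-- Pre_ excludes exactly the inputs where A raises IndexError: empty tiles, empty cycles,
-- and cycles of length 1 when some tile is not full-width (A then indexes cycles[1]);
-- B raises on exactly the same inputs (its histogram pass touches cycles[1] only then).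
def Pre_calc_cycle_in_pyramid_py (tiles : List (Int × Int)) (cycles : List (Int × Int)) : Prop :=
  tiles ≠ [] ∧ cycles ≠ [] ∧
    (tiles.any (fun t => t.2 - t.1 ≠ (tiles.headD (0, 0)).2 - (tiles.headD (0, 0)).1) = true →
      2 ≤ cycles.length)
instance (tiles : List (Int × Int)) (cycles : List (Int × Int)) : Decidable (Pre_calc_cycle_in_pyramid_py tiles cycles) := by unfold Pre_calc_cycle_in_pyramid_py; infer_instance

def pvWitness_calc_cycle_in_pyramid_py : (List (Int × Int)) × (List (Int × Int)) :=
  ([(0, 2), (2, 3)], [(5, 7), (1, 2)])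

def Spec_calc_cycle_in_pyramid_py (tiles : List (Int × Int)) (cycles : List (Int × Int)) (out : Int × Int) : Prop := out = calc_cycle_in_pyramid_py_alt tiles cycles
instance (tiles : List (Int × Int)) (cycles : List (Int × Int)) (out : Int × Int) : Decidable (Spec_calc_cycle_in_pyramid_py tiles cycles out) := by unfold Spec_calc_cycle_in_pyramid_py; infer_instance

-- ===== CLAIM (what is proved, stated in full; the proofs are below) =====
def Claim_equal_calc_cycle_in_pyramid_py : Prop := ∀ (tiles : List (Int × Int)) (cycles : List (Int × Int)), Dom_calc_cycle_in_pyramid_py tiles cycles → Pre_calc_cycle_in_pyramid_py tiles cycles → Spec_calc_cycle_in_pyramid_py tiles cycles (calc_cycle_in_pyramid_py tiles cycles)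

-- ===== LEMMAS AND PROOFS =====

-- a fold accumulating a pair of sums IS the pair of mapped sums
lemma foldl_pair_sum {α : Type} (l : List α) (f g : α → Int) (d c : Int) :
    l.foldl (fun acc t => (acc.1 + f t, acc.2 + g t)) (d, c)
      = (d + (l.map f).sum, c + (l.map g).sum) := by
  induction l generalizing d c with
  | nil => simp
  | cons h t ih => simp [ih]; constructor <;> ring

-- summing an indicator over a duplicate-free list
lemma sum_indicator_nodup (u : List Int) (hu : u.Nodup) (x : Int) (f : Int → Int) :
    (u.map (fun k => if k = x then f x else 0)).sum = if x ∈ u then f x else 0 := by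
  induction u with
  | nil => simp
  | cons y u ih =>
    simp only [List.nodup_cons] at hu
    simp only [List.map_cons, List.sum_cons, ih hu.2, List.mem_cons]
    by_cases hyx : y = x
    · subst hyx; simp [hu.1]
    · by_cases hxu : x ∈ u <;> simp [hyx, hxu, Ne.symm hyx]

-- weighted (count × value) sum over a duplicate-free key list = plain sum over the covered elements
lemma sum_count_mul (u : List Int) (hu : u.Nodup) (f : Int → Int) :
    ∀ ws : List Int,
      (u.map (fun k => (ws.count k : Int) * f k)).sum
        = ((ws.filter (fun w => decide (w ∈ u))).map f).sum := by
  intro ws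
  induction ws with
  | nil => simp
  | cons x ws ih =>
    have h1 : (fun k => (((x :: ws).count k : Int)) * f k)
        = fun k => ((ws.count k : Int) * f k) + (if k = x then f x else 0) := by
      funext k
      by_cases h : k = x
      · subst h; simp; ring
      · simp only [List.count_cons]
        simp [h, Ne.symm h]
    rw [h1, PySem.List.sum_map_add_int, ih, sum_indicator_nodup u hu x f, List.filter_cons]
    by_cases hxu : x ∈ u <;> simp [hxu, add_comm]

-- the histogram-weighted sum over distinct widths equals the per-element sum
lemma sum_over_counter (ws : List Int) (f : Int → Int) :
    ((PySem.Set.ofList ws).map (fun k => (ws.count k : Int) * f k)).sum = (ws.map f).sum := by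
  rw [sum_count_mul (PySem.Set.ofList ws) (PySem.Set.nodup_ofList ws) f ws]
  have : ws.filter (fun w => decide (w ∈ PySem.Set.ofList ws)) = ws := by
    apply List.filter_eq_self.2
    intro a ha
    simp [PySem.Set.mem_ofList, ha]
  rw [this]

-- ===== VERDICT (by name: the statement is the Claim_ definition above) =====
theorem calc_cycle_in_pyramid_py_spec : Claim_equal_calc_cycle_in_pyramid_py := by
  intro tiles cycles _ _
  unfold Spec_calc_cycle_in_pyramid_py calc_cycle_in_pyramid_py calc_cycle_in_pyramid_py_alt
  simp only [PySem.Dict.foldl_insert_getD_add_one_eq_counter, PySem.Dict.items_counter]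
  set ts := ((PySem.List.pyGet? tiles 0).getD (0, 0)).2 - ((PySem.List.pyGet? tiles 0).getD (0, 0)).1 with hts
  set c0 := (PySem.List.pyGet? cycles 0).getD (0, 0) with hc0
  set c1 := (PySem.List.pyGet? cycles 1).getD (0, 0) with hc1
  rw [foldl_pair_sum tiles (fun t => if t.2 - t.1 = ts then c0.1 else c1.1)
        (fun t => if t.2 - t.1 = ts then c0.2 else c1.2) 0 0,
      foldl_pair_sum ((PySem.Set.ofList (tiles.map (fun t => t.2 - t.1))).map
          (fun k => (k, ((tiles.map (fun t => t.2 - t.1)).count k : Int))))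
        (fun p => p.2 * (if p.1 = ts then c0 else c1).1)
        (fun p => p.2 * (if p.1 = ts then c0 else c1).2) 0 0]
  simp only [List.map_map]
  have key : ∀ g : Int → Int,
      ((PySem.Set.ofList (tiles.map (fun t => t.2 - t.1))).map
          (fun k => ((tiles.map (fun t => t.2 - t.1)).count k : Int) * g k)).sum
        = (tiles.map (fun t => g (t.2 - t.1))).sum := by
    intro g
    rw [sum_over_counter (tiles.map (fun t => t.2 - t.1)) g, List.map_map]
    rfl
  rw [← key (fun k => if k = ts then c0.1 else c1.1), ← key (fun k => if k = ts then c0.2 else c1.2)]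
  congr 2 <;>
  · simp only [Function.comp_def]
    congr 1
    apply List.map_congr_left
    intro k _
    by_cases h : k = ts <;> simp [h, mul_comm]
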